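-- pv_equiv track=rewrite | github.com/ian293382/2024Leetcode_Recoder | leet_code/Self-Dividing.py | max_self_diving_difference
-- ===== SOURCE A (Python) =====
-- def is_self_dividing(n):
--     """檢查一個數字是否是自除數"""
--     str_n = str(n)
--     for char in str_n:
--         if char == '0' or n % int(char) != 0:
--             return False
--     return True
--
-- def max_self_diving_difference(a, b):
--     """找出範圍 [a, b] 內所有自除數之間的最大差距"""
--     dividing_list = []
--     for i in range(a, b + 1):
--         if is_self_dividing(i):
--             dividing_list.append(i)
--
--     if not dividing_list or len(dividing_list) < 2:
--         return None  # 如果沒有自除數或不足兩個，則返回 None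
--
--     max_diff = 0
--     max_diff_pair = None
--
--     for i in range(len(dividing_list) - 1):
--         current_diff = dividing_list[i + 1] - dividing_list[i]
--         if current_diff > max_diff:
--             max_diff = current_diff
--             max_diff_pair = (dividing_list[i], dividing_list[i + 1])
--
--     return max_diff_pair
-- ===== SOURCE B (Python) =====
-- def _is_self_dividing(n):
--     """Arithmetic digit check: every decimal digit is nonzero and divides n."""
--     if n <= 0:
--         return False
--     m = n
--     while m:
--         d = m % 10
--         if d == 0 or n % d != 0:
--             return False
--         m //= 10
--     return True
--
--
-- def max_self_diving_difference(a, b):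
--     prev = None
--     count = 0
--     best_diff = 0
--     best = None
--     for i in range(a, b + 1):
--         if _is_self_dividing(i):
--             if prev is not None and i - prev > best_diff:
--                 best_diff = i - prev
--                 best = (prev, i)
--             prev = i
--             count += 1
--     if count < 2:
--         return None
--     return best
-- ===== Notes on version B (the rewrite author's own statement) =====
-- stated objective: alternative
-- what changed: B fuses A's two passes (build the full list of self-dividing numbers, then index-scan adjacent gaps) into one streaming pass keeping only prev/count/best state, and replaces the str()-based digit test by pure arithmetic (n % 10, n //= 10).
import Mathlib
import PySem

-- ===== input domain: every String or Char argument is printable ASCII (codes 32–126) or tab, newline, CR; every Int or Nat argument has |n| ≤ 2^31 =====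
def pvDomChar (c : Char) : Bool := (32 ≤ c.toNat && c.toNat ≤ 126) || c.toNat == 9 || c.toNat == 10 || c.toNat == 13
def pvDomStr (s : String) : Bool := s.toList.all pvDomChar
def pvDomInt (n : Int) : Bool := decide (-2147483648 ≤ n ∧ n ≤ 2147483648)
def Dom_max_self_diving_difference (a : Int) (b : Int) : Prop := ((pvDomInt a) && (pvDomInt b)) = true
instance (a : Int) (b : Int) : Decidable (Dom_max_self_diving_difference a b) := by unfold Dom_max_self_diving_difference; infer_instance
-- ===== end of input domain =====

-- B fuses A's two passes (collect list, then index-scan adjacent gaps) into one streaming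
-- pass with O(1) state, and tests self-division by arithmetic digits instead of str(n).

-- ===== PORT A =====
-- is_self_dividing: the per-char loop over str(n)
def pvSelfDivGoA (n : Int) : List Char → Bool
  | [] => true
  | c :: cs =>
    if c = '0' then false
    else
      match PySem.Int.ofChars? [c] with
      | some d => if PySem.Int.mod n d ≠ 0 then false else pvSelfDivGoA n cs
      | none => false   -- int(char) raises ValueError here (the '-' sign); excluded by Pre_

def is_self_dividing (n : Int) : Bool := pvSelfDivGoA n (PySem.Int.toChars n)

def max_self_diving_difference (a : Int) (b : Int) : Option (Int × Int) :=
  let dividing_list :=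
    (PySem.List.pyRange a (b + 1) 1).foldl
      (fun acc i => if is_self_dividing i then acc ++ [i] else acc) []
  if dividing_list = [] ∨ dividing_list.length < 2 then none
  else
    let st :=
      (PySem.List.pyRange 0 ((dividing_list.length : Int) - 1) 1).foldl
        (fun (st : Int × Option (Int × Int)) i =>
          let current_diff :=
            PySem.List.pyGetD dividing_list (i + 1) 0 - PySem.List.pyGetD dividing_list i 0
          if current_diff > st.1 then
            (current_diff, some (PySem.List.pyGetD dividing_list i 0,
                                 PySem.List.pyGetD dividing_list (i + 1) 0))
          else st)
        (0, none)
    st.2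

-- ===== PORT B =====
-- arithmetic digit loop 'while m: d = m % 10; …; m //= 10' (fuel = m bounds the recursion)
def pvAltDigitsGo (n : Int) : Nat → Nat → Bool
  | _, 0 => true
  | 0, _ + 1 => true   -- fuel exhausted; never reached when fuel ≥ m
  | f + 1, m + 1 =>
    let d := (m + 1) % 10
    if d = 0 then false
    else if PySem.Int.mod n (d : Int) ≠ 0 then false
    else pvAltDigitsGo n f ((m + 1) / 10)

def pvIsSelfDividingAlt (n : Int) : Bool :=
  if n ≤ 0 then false else pvAltDigitsGo n n.toNat n.toNat

def max_self_diving_difference_alt (a : Int) (b : Int) : Option (Int × Int) :=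
  let s :=
    (PySem.List.pyRange a (b + 1) 1).foldl
      (fun (st : Option Int × Int × Int × Option (Int × Int)) i =>
        if pvIsSelfDividingAlt i then
          match st with
          | (some p, count, best_diff, best) =>
            if i - p > best_diff then (some i, count + 1, i - p, some (p, i))
            else (some i, count + 1, best_diff, best)
          | (none, count, best_diff, best) => (some i, count + 1, best_diff, best)
        else st)
      (none, 0, 0, none)
  if s.2.1 < 2 then none else s.2.2.2

-- ===== PRECONDITION & SPEC =====
-- Pre_ excludes exactly the inputs where A raises: if the range [a, b] contains a negative
-- number, is_self_dividing calls int('-') on the sign of str(n) and raises ValueError.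
def Pre_max_self_diving_difference (a : Int) (b : Int) : Prop := 0 ≤ a ∨ b < a
instance (a : Int) (b : Int) : Decidable (Pre_max_self_diving_difference a b) := by
  unfold Pre_max_self_diving_difference; infer_instance

def pvWitness_max_self_diving_difference : Int × Int := (1, 30)

def Spec_max_self_diving_difference (a : Int) (b : Int) (out : Option (Int × Int)) : Prop :=
  out = max_self_diving_difference_alt a b
instance (a : Int) (b : Int) (out : Option (Int × Int)) :
    Decidable (Spec_max_self_diving_difference a b out) := by
  unfold Spec_max_self_diving_difference; infer_instance

-- ===== CLAIM (what is proved, stated in full; the proofs are below) =====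
def Claim_equal_max_self_diving_difference : Prop :=
  ∀ (a : Int) (b : Int), Dom_max_self_diving_difference a b →
    Pre_max_self_diving_difference a b →
      Spec_max_self_diving_difference a b (max_self_diving_difference a b)

-- ===== LEMMAS AND PROOFS =====

lemma pv_digitChar_facts (d : Nat) (hd : d < 10) :
    PySem.Int.ofChars? [Nat.digitChar d] = some (d : Int) ∧ (Nat.digitChar d = '0' ↔ d = 0) := by
  interval_cases d <;> exact ⟨by decide, by decide⟩

lemma pv_tdc_acc (f : Nat) : ∀ (n : Nat) (acc : List Char),
    Nat.toDigitsCore 10 f n acc = Nat.toDigitsCore 10 f n [] ++ acc := by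
  induction f with
  | zero => intro n acc; simp [Nat.toDigitsCore]
  | succ f ih =>
    intro n acc
    by_cases h : n / 10 = 0
    · simp [Nat.toDigitsCore, h]
    · simp only [Nat.toDigitsCore, h, if_false]
      rw [ih (n / 10) (Nat.digitChar (n % 10) :: acc), ih (n / 10) [Nat.digitChar (n % 10)]]
      simp

lemma pv_toDigitsCore_digits (f : Nat) : ∀ (n : Nat), n < f → 0 < n →
    Nat.toDigitsCore 10 f n [] = ((Nat.digits 10 n).map Nat.digitChar).reverse := by
  induction f with
  | zero => intro n h; omega
  | succ f ih =>
    intro n hf hn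
    have h10 : (1 : Nat) < 10 := by norm_num
    by_cases h : n / 10 = 0
    · simp only [Nat.toDigitsCore, h, if_true]
      rw [Nat.digits_def' h10 hn, h, Nat.digits_zero]
      simp
    · simp only [Nat.toDigitsCore, h, if_false]
      rw [pv_tdc_acc, ih (n / 10) (by omega) (Nat.pos_of_ne_zero h),
        Nat.digits_def' h10 hn]
      simp

lemma pv_goA_eq_all (n : Int) (ds : List Nat) (h : ∀ d ∈ ds, d < 10) :
    pvSelfDivGoA n (ds.map Nat.digitChar)
      = ds.all (fun d => !(d == 0) && (PySem.Int.mod n (d : Int) == 0)) := by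
  induction ds with
  | nil => rfl
  | cons d ds ih =>
    obtain ⟨h1, h2⟩ := pv_digitChar_facts d (h d (List.mem_cons_self))
    simp only [List.map_cons, pvSelfDivGoA, List.all_cons, h1]
    by_cases hz : d = 0
    · subst hz
      have hc : Nat.digitChar 0 = '0' := h2.mpr rfl
      simp [hc]
    · rw [if_neg (fun hc => hz (h2.mp hc))]
      by_cases hm : PySem.Int.mod n (d : Int) = 0
      · simp [hm, hz, ih (fun x hx => h x (List.mem_cons_of_mem _ hx))]
      · simp [hm, hz]

lemma pv_altGo_eq_all (n : Int) (f : Nat) : ∀ (m : Nat), m ≤ f →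
    pvAltDigitsGo n f m
      = (Nat.digits 10 m).all (fun d => !(d == 0) && (PySem.Int.mod n (d : Int) == 0)) := by
  induction f with
  | zero => intro m hm; interval_cases m; rfl
  | succ f ih =>
    intro m hm
    match m with
    | 0 => rfl
    | m + 1 =>
      have h10 : (1 : Nat) < 10 := by norm_num
      rw [Nat.digits_def' h10 (Nat.succ_pos m)]
      simp only [pvAltDigitsGo, List.all_cons]
      by_cases hz : (m + 1) % 10 = 0
      · simp [hz]
      · rw [if_neg hz]
        by_cases hmod : PySem.Int.mod n (((m + 1) % 10 : Nat) : Int) = 0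
        · have hle : (m + 1) / 10 ≤ f := by
            have := Nat.div_lt_self (Nat.succ_pos m) h10
            omega
          push_cast at hmod
          simp [hmod, hz, ih ((m + 1) / 10) hle]
        · push_cast at hmod
          simp [hmod, hz]

lemma pv_selfdiv_eq (n : Int) (hn : 0 ≤ n) : is_self_dividing n = pvIsSelfDividingAlt n := by
  rcases eq_or_lt_of_le hn with h0 | hpos
  · rw [← h0]; decide
  · have hnn : ¬ n < 0 := by omega
    have hle : ¬ n ≤ 0 := by omega
    have htn : 0 < n.toNat := by omega
    have hchars : PySem.Int.toChars n = Nat.toDigits 10 n.toNat := by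
      simp [PySem.Int.toChars, hnn]
    rw [is_self_dividing, hchars, Nat.toDigits,
      pv_toDigitsCore_digits (n.toNat + 1) n.toNat (by omega) htn,
      ← List.map_reverse, pv_goA_eq_all n _
        (fun d hd => Nat.digits_lt_base (by norm_num) (List.mem_reverse.mp hd)),
      List.all_reverse]
    rw [pvIsSelfDividingAlt, if_neg hle, pv_altGo_eq_all n n.toNat n.toNat le_rfl]

-- structural form of A's adjacent-gap scan, shared reference point for both proofs
def pvScan2 (st : Int × Option (Int × Int)) (p : Int) : List Int → Int × Option (Int × Int)
  | [] => st
  | y :: ys => pvScan2 (if y - p > st.1 then (y - p, some (p, y)) else st) y ys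

def pvBStep (st : Option Int × Int × Int × Option (Int × Int)) (i : Int) :
    Option Int × Int × Int × Option (Int × Int) :=
  if pvIsSelfDividingAlt i then
    match st with
    | (some p, count, best_diff, best) =>
      if i - p > best_diff then (some i, count + 1, i - p, some (p, i))
      else (some i, count + 1, best_diff, best)
    | (none, count, best_diff, best) => (some i, count + 1, best_diff, best)
  else st

lemma pv_B_some (xs : List Int) : ∀ (p c bd : Int) (bs : Option (Int × Int)),
    xs.foldl pvBStep (some p, c, bd, bs)
      = (some ((xs.filter pvIsSelfDividingAlt).getLastD p),
         c + (xs.filter pvIsSelfDividingAlt).length,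
         pvScan2 (bd, bs) p (xs.filter pvIsSelfDividingAlt)) := by
  induction xs with
  | nil => intro p c bd bs; simp [pvScan2]
  | cons x xs ih =>
    intro p c bd bs
    by_cases h : pvIsSelfDividingAlt x
    · rw [List.foldl_cons]
      have hstep : pvBStep (some p, c, bd, bs) x
          = (some x, c + 1,
             (if x - p > bd then ((x - p : Int), some (p, x)) else (bd, bs)).1,
             (if x - p > bd then ((x - p : Int), some (p, x)) else (bd, bs)).2) := by
        by_cases hc : x - p > bd <;> simp [pvBStep, h, hc]
      rw [hstep, ih]
      have h3 : pvScan2 (bd, bs) p (x :: xs.filter pvIsSelfDividingAlt)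
          = pvScan2 ((if x - p > bd then ((x - p : Int), some (p, x)) else (bd, bs)).1,
                     (if x - p > bd then ((x - p : Int), some (p, x)) else (bd, bs)).2) x
              (xs.filter pvIsSelfDividingAlt) := by
        rw [pvScan2]
      simp only [List.filter_cons, h, if_true, List.getLastD_cons, List.length_cons, h3,
        Prod.mk.injEq, true_and, and_true]
      push_cast
      ring
    · rw [List.foldl_cons]
      have : pvBStep (some p, c, bd, bs) x = (some p, c, bd, bs) := by simp [pvBStep, h]
      rw [this, ih]
      simp [h]

lemma pv_B_none (xs : List Int) :
    xs.foldl pvBStep (none, 0, 0, none)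
      = match xs.filter pvIsSelfDividingAlt with
        | [] => ((none : Option Int), (0 : Int), (0 : Int), (none : Option (Int × Int)))
        | q :: qs => (some (qs.getLastD q), 1 + (qs.length : Int), pvScan2 (0, none) q qs) := by
  induction xs with
  | nil => rfl
  | cons x xs ih =>
    by_cases h : pvIsSelfDividingAlt x
    · rw [List.foldl_cons]
      have : pvBStep (none, 0, 0, none) x = (some x, 1, 0, none) := by simp [pvBStep, h]
      rw [this, pv_B_some]
      simp only [List.filter_cons, h, if_true]
    · rw [List.foldl_cons]
      have : pvBStep (none, 0, 0, none) x = (none, 0, 0, none) := by simp [pvBStep, h]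
      rw [this, ih]
      simp [h]

def pvIdxFoldNat (L : List Int) (st : Int × Option (Int × Int)) (ks : List Nat) :
    Int × Option (Int × Int) :=
  ks.foldl
    (fun st k =>
      let cur := L.getD (k + 1) 0 - L.getD k 0
      if cur > st.1 then (cur, some (L.getD k 0, L.getD (k + 1) 0)) else st)
    st

lemma pv_idxFoldNat_scan2 (qs : List Int) : ∀ (q : Int) (st : Int × Option (Int × Int)),
    pvIdxFoldNat (q :: qs) st (List.range qs.length) = pvScan2 st q qs := by
  induction qs with
  | nil => intro q st; rfl
  | cons y ys ih =>
    intro q st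
    simp only [pvIdxFoldNat, List.length_cons, List.range_succ_eq_map, List.foldl_cons,
      List.foldl_map]
    have hbody : (fun (st : Int × Option (Int × Int)) (k : Nat) =>
          let cur := (q :: y :: ys).getD (Nat.succ k + 1) 0 - (q :: y :: ys).getD (Nat.succ k) 0
          if cur > st.1 then
            (cur, some ((q :: y :: ys).getD (Nat.succ k) 0, (q :: y :: ys).getD (Nat.succ k + 1) 0))
          else st)
        = (fun (st : Int × Option (Int × Int)) (k : Nat) =>
          let cur := (y :: ys).getD (k + 1) 0 - (y :: ys).getD k 0
          if cur > st.1 then (cur, some ((y :: ys).getD k 0, (y :: ys).getD (k + 1) 0))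
          else st) := by
      funext st k
      simp [Nat.succ_eq_add_one]
    have hinit : (let cur := (q :: y :: ys).getD (0 + 1) 0 - (q :: y :: ys).getD 0 0
        if cur > st.1 then (cur, some ((q :: y :: ys).getD 0 0, (q :: y :: ys).getD (0 + 1) 0))
        else st) = (if y - q > st.1 then ((y - q : Int), some (q, y)) else st) := by
      simp [List.getD]
    rw [pvScan2, ← ih y (if y - q > st.1 then ((y - q : Int), some (q, y)) else st), pvIdxFoldNat,
      ← hinit, ← hbody]

lemma pv_A_scan (q : Int) (qs : List Int) (st : Int × Option (Int × Int)) :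
    (PySem.List.pyRange 0 (((q :: qs).length : Int) - 1) 1).foldl
      (fun (st : Int × Option (Int × Int)) i =>
        let current_diff :=
          PySem.List.pyGetD (q :: qs) (i + 1) 0 - PySem.List.pyGetD (q :: qs) i 0
        if current_diff > st.1 then
          (current_diff, some (PySem.List.pyGetD (q :: qs) i 0,
                               PySem.List.pyGetD (q :: qs) (i + 1) 0))
        else st)
      st = pvScan2 st q qs := by
  have hlen : (((q :: qs).length : Int) - 1) = ((qs.length : Nat) : Int) := by
    simp [List.length_cons]
  rw [hlen, PySem.List.pyRange_zero_nat, List.foldl_map]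
  have hb : (fun (st : Int × Option (Int × Int)) (k : Nat) =>
        let current_diff :=
          PySem.List.pyGetD (q :: qs) ((k : Int) + 1) 0 - PySem.List.pyGetD (q :: qs) (k : Int) 0
        if current_diff > st.1 then
          (current_diff, some (PySem.List.pyGetD (q :: qs) (k : Int) 0,
                               PySem.List.pyGetD (q :: qs) ((k : Int) + 1) 0))
        else st)
      = (fun (st : Int × Option (Int × Int)) (k : Nat) =>
        let cur := (q :: qs).getD (k + 1) 0 - (q :: qs).getD k 0
        if cur > st.1 then (cur, some ((q :: qs).getD k 0, (q :: qs).getD (k + 1) 0)) else st) := by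
    funext st k
    have hcast : ((k : Int) + 1) = ((k + 1 : Nat) : Int) := by push_cast; ring
    rw [hcast, PySem.List.pyGetD_natCast, PySem.List.pyGetD_natCast]
  rw [hb]
  exact pv_idxFoldNat_scan2 qs q st

-- ===== VERDICT (by name: the statement is the Claim_ definition above) =====
theorem max_self_diving_difference_spec : Claim_equal_max_self_diving_difference := by
  intro a b _ hpre
  unfold Spec_max_self_diving_difference
  unfold Pre_max_self_diving_difference at hpre
  rcases hpre with ha | hba
  · -- 0 ≤ a : every element of the range is nonnegative
    have hfilt : (PySem.List.pyRange a (b + 1) 1).filter is_self_dividing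
        = (PySem.List.pyRange a (b + 1) 1).filter pvIsSelfDividingAlt :=
      List.filter_congr (fun x hx =>
        pv_selfdiv_eq x (le_trans ha (PySem.List.mem_pyRange_one.mp hx).1))
    have hA : (PySem.List.pyRange a (b + 1) 1).foldl
          (fun acc i => if is_self_dividing i then acc ++ [i] else acc) []
        = (PySem.List.pyRange a (b + 1) 1).filter pvIsSelfDividingAlt := by
      rw [← hfilt]
      simpa using PySem.List.foldl_append_if is_self_dividing id (PySem.List.pyRange a (b + 1) 1) []
    have hB : (PySem.List.pyRange a (b + 1) 1).foldl
          (fun (st : Option Int × Int × Int × Option (Int × Int)) i =>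
            if pvIsSelfDividingAlt i then
              match st with
              | (some p, count, best_diff, best) =>
                if i - p > best_diff then (some i, count + 1, i - p, some (p, i))
                else (some i, count + 1, best_diff, best)
              | (none, count, best_diff, best) => (some i, count + 1, best_diff, best)
            else st)
          (none, 0, 0, none)
        = (PySem.List.pyRange a (b + 1) 1).foldl pvBStep (none, 0, 0, none) := rfl
    rw [max_self_diving_difference, max_self_diving_difference_alt]
    simp only [hA, hB, pv_B_none]
    cases hc : (PySem.List.pyRange a (b + 1) 1).filter pvIsSelfDividingAlt with
    | nil => simp
    | cons q qs =>
      cases qs with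
      | nil => simp
      | cons y ys =>
        have hguard : ¬ ((q :: y :: ys) = [] ∨ (q :: y :: ys).length < 2) := by
          simp [List.length_cons]
        have hcnt : ¬ ((1 : Int) + ((y :: ys).length : Int) < 2) := by
          simp only [List.length_cons]
          push_cast
          omega
        rw [if_neg hguard, if_neg hcnt]
        simp only [pv_A_scan q (y :: ys) (0, none)]
  · -- b < a : empty range, both sides return none
    have hnil : PySem.List.pyRange a (b + 1) 1 = [] :=
      PySem.List.pyRange_one_eq_nil (by omega)
    rw [max_self_diving_difference, max_self_diving_difference_alt, hnil]
    simp
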